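-- pv_equiv track=rewrite | github.com/imasharc/aegis_project | backend/processing/internal_security/internal_security_summary_generator.py | _group_procedures_by_complexity
-- ===== SOURCE A (Python) =====
-- from typing import Dict, List, Any, Set
--
-- def _group_procedures_by_complexity(implementation_complexity: Dict[str, str]) -> Dict[str, List[str]]:
--     """Group procedures by their implementation complexity level."""
--     complexity_groups = {}
--
--     for procedure, complexity in implementation_complexity.items():
--         if complexity not in complexity_groups:
--             complexity_groups[complexity] = []
--         complexity_groups[complexity].append(procedure)
--
--     # Sort procedures within each complexity group
--     for complexity in complexity_groups:
--         complexity_groups[complexity].sort()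
--
--     return complexity_groups
-- ===== SOURCE B (Python) =====
-- def _group_procedures_by_complexity(implementation_complexity):
--     """Group procedures by their implementation complexity level."""
--     order = list(dict.fromkeys(implementation_complexity.values()))
--     return {
--         level: sorted(p for p, c in implementation_complexity.items() if c == level)
--         for level in order
--     }
-- ===== Notes on version B (the rewrite author's own statement) =====
-- stated objective: idiomatic
-- what changed: Replaces the bucketing loop with per-group in-place sorts by first computing the distinct complexity levels in first-appearance order (dict.fromkeys) and then building each group with a filter-and-sort dict comprehension.
import Mathlib
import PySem

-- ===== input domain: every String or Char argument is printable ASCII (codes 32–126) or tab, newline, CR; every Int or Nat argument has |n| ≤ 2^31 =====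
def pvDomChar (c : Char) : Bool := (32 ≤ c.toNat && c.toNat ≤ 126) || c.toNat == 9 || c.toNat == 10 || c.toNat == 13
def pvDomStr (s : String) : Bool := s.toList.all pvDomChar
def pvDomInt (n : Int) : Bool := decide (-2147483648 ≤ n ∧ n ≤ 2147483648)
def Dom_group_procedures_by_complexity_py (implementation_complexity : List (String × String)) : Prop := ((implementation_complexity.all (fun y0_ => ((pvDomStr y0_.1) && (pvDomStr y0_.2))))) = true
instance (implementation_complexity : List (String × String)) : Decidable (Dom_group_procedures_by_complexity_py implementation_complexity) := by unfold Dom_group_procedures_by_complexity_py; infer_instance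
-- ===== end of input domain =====

-- B replaces A's bucketing loop + per-group sorts with a dict comprehension over the
-- distinct complexity levels (first-appearance order), filtering and sorting each group (idiomatic).


-- ===== PORT A =====
-- the body of A's first loop: `if complexity not in groups: groups[complexity] = []`
-- then `groups[complexity].append(procedure)` (list append in place = modify with ++ [p])
def pvStepA (g : PySem.Dict String (List String)) (pc : String × String) :
    PySem.Dict String (List String) :=
  let g1 := if g.contains pc.2 then g else g.insert pc.2 []
  g1.modify pc.2 [] (fun v => v ++ [pc.1])

def group_procedures_by_complexity_py (implementation_complexity : List (String × String)) : List (String × List String) :=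
  let complexity_groups := implementation_complexity.foldl pvStepA PySem.Dict.empty
  -- second loop: sort each group's list in place
  (complexity_groups.items).map (fun kv => (kv.1, PySem.List.sorted kv.2 (fun x => x) false))

-- ===== PORT B =====
def group_procedures_by_complexity_py_alt (implementation_complexity : List (String × String)) : List (String × List String) :=
  let order := PySem.List.dedup (implementation_complexity.map (fun pc => pc.2))
  order.map (fun level =>
    (level,
     PySem.List.sorted
       ((implementation_complexity.filter (fun pc => pc.2 == level)).map (fun pc => pc.1))
       (fun x => x) false))

-- ===== PRECONDITION & SPEC =====
def Spec_group_procedures_by_complexity_py (implementation_complexity : List (String × String)) (out : List (String × List String)) : Prop := out = group_procedures_by_complexity_py_alt implementation_complexity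
instance (implementation_complexity : List (String × String)) (out : List (String × List String)) : Decidable (Spec_group_procedures_by_complexity_py implementation_complexity out) := by unfold Spec_group_procedures_by_complexity_py; infer_instance

-- ===== CLAIM (what is proved, stated in full; the proofs are below) =====
def Claim_equal_group_procedures_by_complexity_py : Prop := ∀ (implementation_complexity : List (String × String)), Dom_group_procedures_by_complexity_py implementation_complexity → Spec_group_procedures_by_complexity_py implementation_complexity (group_procedures_by_complexity_py implementation_complexity)

-- ===== LEMMAS AND PROOFS =====

-- keys of one A-loop step: the key set grows by pc.2 (Set.add)
theorem pvStepA_keys (g : PySem.Dict String (List String)) (pc : String × String) :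
    (pvStepA g pc).keys = PySem.Set.add g.keys pc.2 := by
  unfold pvStepA PySem.Set.add
  by_cases h : g.contains pc.2 = true
  · simp only [h, if_pos]
    rw [PySem.Dict.keys_modify, PySem.Dict.keys_insert_of_contains _ _ h]
    have hm : pc.2 ∈ g.keys := (PySem.Dict.contains_iff_mem_keys g pc.2).mp h
    rw [if_pos ((PySem.Set.contains_iff g.keys pc.2).mpr hm)]
  · have h' : g.contains pc.2 = false := by simpa using h
    simp only [h', Bool.false_eq_true, reduceIte]
    rw [PySem.Dict.keys_modify,
        PySem.Dict.keys_insert_of_contains _ _ (PySem.Dict.contains_insert_self g pc.2 []),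
        PySem.Dict.keys_insert_of_not_contains _ _ h']
    have hm : pc.2 ∉ g.keys := fun hm => by
      rw [(PySem.Dict.contains_iff_mem_keys g pc.2).mpr hm] at h'; exact Bool.noConfusion h'
    rw [if_neg (fun hcon => hm ((PySem.Set.contains_iff g.keys pc.2).mp hcon))]

-- getD after one A-loop step
theorem pvStepA_getD (g : PySem.Dict String (List String)) (pc : String × String) (c : String) :
    (pvStepA g pc).getD c [] =
      if pc.2 == c then g.getD c [] ++ [pc.1] else g.getD c [] := by
  unfold pvStepA
  by_cases h : g.contains pc.2 = true
  · simp only [h, reduceIte]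
    rw [PySem.Dict.getD_modify]
    by_cases hc : c = pc.2
    · subst hc; simp
    · simp [hc, beq_iff_eq, Ne.symm hc]
  · have h' : g.contains pc.2 = false := by simpa using h
    simp only [h', Bool.false_eq_true, reduceIte]
    rw [PySem.Dict.getD_modify]
    by_cases hc : c = pc.2
    · subst hc
      simp [PySem.Dict.getD_of_not_contains g _ h']
    · simp [hc, beq_iff_eq, Ne.symm hc, PySem.Dict.getD_insert]

-- getD after the whole A-loop: the group for c is the filtered procedures in order
theorem pvFoldA_getD (l : List (String × String)) (g : PySem.Dict String (List String)) (c : String) :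
    (l.foldl pvStepA g).getD c [] =
      g.getD c [] ++ (l.filter (fun pc => pc.2 == c)).map (fun pc => pc.1) := by
  induction l generalizing g with
  | nil => simp
  | cons pc t ih =>
    rw [List.foldl_cons, ih, pvStepA_getD]
    by_cases hc : pc.2 = c
    · simp [hc]
    · simp [hc, beq_iff_eq]

-- keys after the whole A-loop
theorem pvFoldA_keys (l : List (String × String)) (g : PySem.Dict String (List String)) :
    (l.foldl pvStepA g).keys = PySem.Set.update g.keys (l.map (fun pc => pc.2)) := by
  induction l generalizing g with
  | nil => simp [PySem.Set.update_nil]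
  | cons pc t ih => rw [List.foldl_cons, ih, pvStepA_keys, List.map_cons, PySem.Set.update_cons]

-- ===== VERDICT (by name: the statement is the Claim_ definition above) =====
theorem group_procedures_by_complexity_py_spec : Claim_equal_group_procedures_by_complexity_py := by
  intro l _
  unfold Spec_group_procedures_by_complexity_py group_procedures_by_complexity_py group_procedures_by_complexity_py_alt
  dsimp only
  have hk : (l.foldl pvStepA PySem.Dict.empty).keys
      = PySem.Set.ofList (l.map (fun pc => pc.2)) := by
    rw [pvFoldA_keys, PySem.Dict.keys_empty, PySem.Set.update_nil_left]
  have hn : (l.foldl pvStepA PySem.Dict.empty).keys.Nodup := by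
    rw [hk]; exact PySem.Set.nodup_ofList _
  rw [PySem.Dict.items_eq_map_keys _ hn [], List.map_map, PySem.List.dedup_eq_ofList, ← hk]
  refine List.map_congr_left (fun k _ => ?_)
  simp only [Function.comp]
  rw [pvFoldA_getD, PySem.Dict.getD_empty, List.nil_append]
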